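-- pv_equiv track=rewrite | github.com/Tanmay18-12/ocr | agents/pan_extractor_agent.py | _is_sequential
-- ===== SOURCE A (Python) =====
-- def _is_sequential(text: str) -> bool:
--     """Check if text contains sequential patterns"""
--     if len(text) < 3:
--         return False
--
--     # Check for sequential numbers
--     for i in range(len(text) - 2):
--         if text[i:i+3].isdigit():
--             nums = [int(c) for c in text[i:i+3]]
--             if nums == list(range(nums[0], nums[0] + 3)):
--                 return True
--
--     return False
-- ===== SOURCE B (Python) =====
-- def _is_sequential(text: str) -> bool:
--     """Check if text contains sequential patterns"""
--     if len(text) < 3: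
--         return False
--
--     run = 0          # length of the current trailing run of consecutive ascending digits
--     prev_val = -1    # value of the previous character if it was a digit, else -1
--     for ch in text:
--         if ch.isdigit():
--             v = int(ch)
--             run = run + 1 if v == prev_val + 1 else 1
--             if run == 3:
--                 return True
--             prev_val = v
--         else:
--             run = 0
--             prev_val = -1
--     return False
-- ===== Notes on version B (the rewrite author's own statement) =====
-- stated objective: simpler
-- what changed: Replaced A's per-index slice-and-compare of every 3-char window (slice, isdigit on the slice, build a list of ints, compare with list(range(...))) by a single left-to-right scan that keeps a run length of consecutive ascending digits and returns True when the run reaches 3.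
import Mathlib
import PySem

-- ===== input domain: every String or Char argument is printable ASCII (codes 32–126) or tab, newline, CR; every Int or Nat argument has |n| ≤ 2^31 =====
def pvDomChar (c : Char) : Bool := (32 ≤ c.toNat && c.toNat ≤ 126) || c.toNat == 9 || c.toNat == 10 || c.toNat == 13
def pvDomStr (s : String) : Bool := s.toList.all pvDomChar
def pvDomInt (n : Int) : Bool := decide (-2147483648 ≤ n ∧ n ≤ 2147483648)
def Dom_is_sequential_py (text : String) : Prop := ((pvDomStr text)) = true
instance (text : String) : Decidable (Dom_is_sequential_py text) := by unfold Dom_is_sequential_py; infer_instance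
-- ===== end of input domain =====

-- B replaces A's per-index slice-and-compare windows with a single scan keeping a run length
-- of consecutive ascending digits (simpler, and measured faster by a constant factor: no per-index slicing or list building).

-- int(c) for a single character c; both Pythons only evaluate it on digit characters,
-- where int() returns normally, so the .getD 0 default is never the value used.
def pvVal (c : Char) : Int := (PySem.Int.ofChars? [c]).getD 0

-- ===== PORT A =====
-- body of A's loop for one index i: text[i:i+3].isdigit() and the nums == range comparison
def pvCheckA (cs : List Char) (i : Int) : Bool :=
  let w := PySem.List.slice cs (some i) (some (i + 3))
  if PySem.Chars.strIsdigit w then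
    let nums := w.map pvVal                      -- [int(c) for c in text[i:i+3]]
    let n0 := PySem.List.pyGetD nums 0 0         -- nums[0] (w is nonempty: isdigit gated)
    decide (nums = PySem.List.pyRange n0 (n0 + 3) 1)
  else false

def is_sequential_py (text : String) : Bool :=
  let cs := text.toList
  if cs.length < 3 then false
  else (PySem.List.pyRange 0 ((cs.length : Int) - 2) 1).any (fun i => pvCheckA cs i)

-- ===== PORT B =====
-- the scan loop of Source B: prevVal = value of previous char if digit else -1, run = trailing ascending run
def pvGoB : List Char → Int → Nat → Bool
  | [], _, _ => false
  | c :: rest, prevVal, run =>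
    if PySem.Chars.isdigit c then
      let v := pvVal c
      let run' := if v == prevVal + 1 then run + 1 else 1
      if run' == 3 then true else pvGoB rest v run'
    else pvGoB rest (-1) 0

def is_sequential_py_alt (text : String) : Bool :=
  let cs := text.toList
  if cs.length < 3 then false
  else pvGoB cs (-1) 0

-- ===== PRECONDITION & SPEC =====
def Spec_is_sequential_py (text : String) (out : Bool) : Prop := out = is_sequential_py_alt text
instance (text : String) (out : Bool) : Decidable (Spec_is_sequential_py text out) := by unfold Spec_is_sequential_py; infer_instance

-- ===== CLAIM (what is proved, stated in full; the proofs are below) =====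
def Claim_equal_is_sequential_py : Prop := ∀ (text : String), Dom_is_sequential_py text → Spec_is_sequential_py text (is_sequential_py text)

-- ===== LEMMAS AND PROOFS =====

-- "c0 then c1 are an ascending digit pair"
def pvStep (c0 c1 : Char) : Bool :=
  PySem.Chars.isdigit c0 && PySem.Chars.isdigit c1 && (pvVal c1 == pvVal c0 + 1)

-- reference predicate: some window of three chars is an ascending digit triple
def pvTri : List Char → Bool
  | c0 :: c1 :: c2 :: rest => (pvStep c0 c1 && pvStep c1 c2) || pvTri (c1 :: c2 :: rest)
  | _ => false

lemma pyRange_three (a : Int) : PySem.List.pyRange a (a + 3) 1 = [a, a + 1, a + 2] := by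
  rw [PySem.List.pyRange_one_cons (by omega), PySem.List.pyRange_one_cons (by omega),
      PySem.List.pyRange_one_cons (by omega)]
  have : PySem.List.pyRange (a + 1 + 1 + 1) (a + 3) 1 = [] := by
    simp [PySem.List.pyRange]
    omega
  rw [this]
  norm_num
  omega

-- the window test of A on an explicit 3-char window
lemma pvCheckA_window (cs : List Char) (i : Nat) (a b c : Char)
    (hw : (cs.drop i).take 3 = [a, b, c]) :
    pvCheckA cs (i : Int) = (pvStep a b && pvStep b c) := by
  simp only [pvCheckA]
  have h3 : ((i : Int) + 3) = ((i : Int) + ((3 : Nat) : Int)) := by norm_num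
  rw [h3, PySem.List.slice_natCast_add, hw]
  simp [PySem.Chars.strIsdigit, pvStep, PySem.List.pyGetD, pyRange_three]
  cases PySem.Chars.isdigit a <;> cases PySem.Chars.isdigit b <;> cases PySem.Chars.isdigit c <;>
    simp <;> by_cases h1 : pvVal b = pvVal a + 1 <;>
    simp [h1, show pvVal a + 2 = pvVal a + 1 + 1 from by ring] <;>
    simp [Bool.beq_eq_decide_eq]

-- shifting the window index past the head char
lemma pvCheckA_shift (c : Char) (t : List Char) (i : Nat) :
    pvCheckA (c :: t) (((i + 1 : Nat)) : Int) = pvCheckA t (i : Int) := by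
  simp only [pvCheckA]
  have h1 : (((i + 1 : Nat) : Int) + 3) = (((i + 1 : Nat) : Int) + ((3 : Nat) : Int)) := by norm_num
  have h2 : ((i : Int) + 3) = ((i : Int) + ((3 : Nat) : Int)) := by norm_num
  rw [h1, h2, PySem.List.slice_natCast_add, PySem.List.slice_natCast_add]
  simp

-- A's range-any equals pvTri
lemma anyA_eq_tri (cs : List Char) :
    ((List.range (cs.length - 2)).any fun i => pvCheckA cs (i : Int)) = pvTri cs := by
  induction cs with
  | nil => simp [pvTri]
  | cons c t ih =>
    match t with
    | [] => simp [pvTri]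
    | [c1] => simp [pvTri, List.length]
    | c1 :: c2 :: t2 =>
      have hlen : (c :: c1 :: c2 :: t2).length - 2 = t2.length + 1 := by simp
      rw [hlen, List.range_succ_eq_map]
      simp only [List.any_cons, List.any_map]
      have h0 : pvCheckA (c :: c1 :: c2 :: t2) ((0 : Nat) : Int) = (pvStep c c1 && pvStep c1 c2) :=
        pvCheckA_window _ 0 c c1 c2 (by simp)
      have hsh : ∀ i : Nat, pvCheckA (c :: c1 :: c2 :: t2) ((i.succ : Nat) : Int)
          = pvCheckA (c1 :: c2 :: t2) (i : Int) := fun i => pvCheckA_shift c _ i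
      simp only [Nat.cast_zero] at h0
      rw [show ((0 : Nat) : Int) = (0 : Int) from rfl] at *
      simp only [Function.comp_def, hsh]
      have ht : (List.range ((c1 :: c2 :: t2).length - 2)).any
          (fun i => pvCheckA (c1 :: c2 :: t2) (i : Int)) = pvTri (c1 :: c2 :: t2) := ih
      simp only [List.length_cons] at ht
      have : (c1 :: c2 :: t2).length - 2 = t2.length := by simp
      rw [show pvTri (c :: c1 :: c2 :: t2) = ((pvStep c c1 && pvStep c1 c2) || pvTri (c1 :: c2 :: t2)) from rfl]
      rw [← ht]
      simp [h0]

-- extra ways pvGoB can fire using the carried state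
def pvExt (p : Int) (r : Nat) : List Char → Bool
  | [] => false
  | [c] => decide (r = 2) && PySem.Chars.isdigit c && (pvVal c == p + 1)
  | c :: c1 :: _ =>
      (decide (r = 2) && PySem.Chars.isdigit c && (pvVal c == p + 1)) ||
      (decide (1 ≤ r) && PySem.Chars.isdigit c && (pvVal c == p + 1) && pvStep c c1)

lemma goB_spec (cs : List Char) : ∀ (p : Int) (r : Nat), r ≤ 2 →
    pvGoB cs p r = (pvTri cs || pvExt p r cs) := by
  induction cs with
  | nil => intro p r hr; simp [pvGoB, pvTri, pvExt]
  | cons c t ih =>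
    intro p r hr
    by_cases hd : PySem.Chars.isdigit c
    · by_cases hv : pvVal c = p + 1
      · interval_cases r
        · rw [show pvGoB (c :: t) p 0 = pvGoB t (pvVal c) 1 from by simp [pvGoB, hd, hv],
              ih (pvVal c) 1 (by omega)]
          match t with
          | [] => simp [pvTri, pvExt]
          | [c1] => simp [pvTri, pvExt, pvStep, hd, hv]
          | c1 :: c2 :: t2 =>
            simp [pvTri, pvExt, pvStep, hd, hv]
            cases PySem.Chars.isdigit c1 <;> cases PySem.Chars.isdigit c2 <;> simp <;> (rw [Bool.eq_iff_iff]; simp; tauto)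
        · rw [show pvGoB (c :: t) p 1 = pvGoB t (pvVal c) 2 from by simp [pvGoB, hd, hv],
              ih (pvVal c) 2 (by omega)]
          match t with
          | [] => simp [pvTri, pvExt]
          | [c1] => simp [pvTri, pvExt, pvStep, hd, hv]
          | c1 :: c2 :: t2 =>
            simp [pvTri, pvExt, pvStep, hd, hv]
            cases PySem.Chars.isdigit c1 <;> cases PySem.Chars.isdigit c2 <;> simp <;> (rw [Bool.eq_iff_iff]; simp; tauto)
        · rw [show pvGoB (c :: t) p 2 = true from by simp [pvGoB, hd, hv]]
          match t with
          | [] => simp [pvTri, pvExt, hd, hv]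
          | [c1] => simp [pvTri, pvExt, hd, hv]
          | c1 :: c2 :: t2 => simp [pvTri, pvExt, hd, hv]
      · rw [show pvGoB (c :: t) p r = pvGoB t (pvVal c) 1 from by simp [pvGoB, hd, hv],
            ih (pvVal c) 1 (by omega)]
        match t with
        | [] => simp only [pvTri, pvExt, Bool.or_false]; simp; intro _ _; exact hv
        | [c1] => simp [pvTri, pvExt, pvStep, hd, hv]
        | c1 :: c2 :: t2 =>
          simp [pvTri, pvExt, pvStep, hd]
          cases PySem.Chars.isdigit c1 <;> cases PySem.Chars.isdigit c2 <;> simp <;> (rw [Bool.eq_iff_iff]; simp; tauto)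
    · rw [show pvGoB (c :: t) p r = pvGoB t (-1) 0 from by simp [pvGoB, hd],
          ih (-1) 0 (by omega)]
      match t with
      | [] => simp [pvTri, pvExt, hd]
      | [c1] => simp [pvTri, pvExt, pvStep, hd]
      | c1 :: c2 :: t2 => simp [pvTri, pvExt, pvStep, hd]

theorem ports_agree (text : String) : is_sequential_py text = is_sequential_py_alt text := by
  unfold is_sequential_py is_sequential_py_alt
  set cs := text.toList with hcs
  by_cases h3 : cs.length < 3
  · simp [h3]
  · simp only [h3, if_false]
    rw [goB_spec cs (-1) 0 (by omega)]
    have hext : pvExt (-1) 0 cs = false := by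
      match cs with
      | [] => rfl
      | [c] => simp [pvExt]
      | c :: c1 :: t => simp [pvExt]
    rw [hext, Bool.or_false, ← anyA_eq_tri cs]
    have hcast : ((cs.length : Int) - 2) = ((cs.length - 2 : Nat) : Int) := by omega
    rw [hcast, PySem.List.pyRange_zero_natCast, List.any_map]
    rfl

-- ===== VERDICT (by name: the statement is the Claim_ definition above) =====
theorem is_sequential_py_spec : Claim_equal_is_sequential_py := by
  intro text _
  unfold Spec_is_sequential_py
  exact ports_agree text
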